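-- pv_equiv track=rewrite | github.com/kirolos997/SoftwarePerformanceEvaluation | SWPE_ASS1.py | functionStartEndIndexChecker
-- ===== SOURCE A (Python) =====
-- def functionStartEndIndexChecker (codeline):
--     functionType=''
--     foundval=False
--     argument=''
--     changeName=True
--     if ('{' in codeline or '}' in codeline):
--         foundval = True
--     elif ('return' in codeline):
--         argument = codeline.replace('return', '')
--         foundval = True
--     for index in range(0,len(codeline)-1):
--         if not (codeline[index]==' ') and changeName:
--             functionType=functionType+codeline[index]
--             if codeline[index+1] == ' ':
--                 changeName= False
--         if codeline[index]==';':
--             functionType = ''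
--             break
--
--     if not(functionType=='void'or functionType=='int'or functionType=='double'or functionType=='float'):
--         functionType=''
--     return foundval , functionType,argument
-- ===== SOURCE B (Python) =====
-- def functionStartEndIndexChecker(codeline):
--     foundval = False
--     argument = ''
--     if '{' in codeline or '}' in codeline:
--         foundval = True
--     elif 'return' in codeline:
--         argument = codeline.replace('return', '')
--         foundval = True
--     scanned = codeline[:-1]
--     if ';' in scanned:
--         functionType = ''
--     else:
--         functionType = scanned.lstrip(' ').split(' ')[0]
--     if functionType not in ('void', 'int', 'double', 'float'):
--         functionType = ''
--     return foundval, functionType, argument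
-- ===== Notes on version B (the rewrite author's own statement) =====
-- stated objective: idiomatic
-- what changed: Replaced the char-by-char scanning loop with its changeName flag and break by slice/lstrip/split string operations on codeline[:-1] guarded by a ';' membership test.
import Mathlib
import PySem

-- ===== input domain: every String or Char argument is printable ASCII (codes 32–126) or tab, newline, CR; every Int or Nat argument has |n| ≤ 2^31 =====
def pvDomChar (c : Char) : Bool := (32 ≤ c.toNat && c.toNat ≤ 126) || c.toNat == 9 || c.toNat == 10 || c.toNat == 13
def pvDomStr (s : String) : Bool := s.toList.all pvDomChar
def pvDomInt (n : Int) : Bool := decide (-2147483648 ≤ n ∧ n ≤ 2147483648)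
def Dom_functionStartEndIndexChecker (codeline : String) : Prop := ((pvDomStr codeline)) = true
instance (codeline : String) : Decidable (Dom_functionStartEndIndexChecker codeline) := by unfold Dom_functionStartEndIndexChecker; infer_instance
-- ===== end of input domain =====

-- B replaces A's stateful char-by-char scan (changeName flag + mid-loop break) by slice/lstrip/split string operations; idiomatic, same cost.

-- ===== PORT A =====
-- A's 'for index in range(0, len(codeline)-1)' loop, state = (functionType, changeName);
-- the ';' branch ('functionType = ""; break') returns [] directly
def pvALoop : List Char → List Char → Bool → List Char
  | c :: d :: rest, ft, cn =>
      let st := if c ≠ ' ' ∧ cn = true then (ft ++ [c], if d = ' ' then false else cn) else (ft, cn)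
      if c = ';' then [] else pvALoop (d :: rest) st.1 st.2
  | _, ft, _ => ft

def functionStartEndIndexChecker (codeline : String) : Bool × String × String :=
  let fa : Bool × String :=
    if PySem.Str.isIn "{" codeline || PySem.Str.isIn "}" codeline then (true, "")
    else if PySem.Str.isIn "return" codeline then (true, PySem.Str.replace codeline "return" "")
    else (false, "")
  let ft := pvALoop codeline.toList [] true
  let ftS := if ¬ (ft = "void".toList ∨ ft = "int".toList ∨ ft = "double".toList ∨ ft = "float".toList)
             then "" else String.ofList ft
  (fa.1, ftS, fa.2)

-- ===== PORT B =====
def functionStartEndIndexChecker_alt (codeline : String) : Bool × String × String :=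
  let fa : Bool × String :=
    if PySem.Str.isIn "{" codeline || PySem.Str.isIn "}" codeline then (true, "")
    else if PySem.Str.isIn "return" codeline then (true, PySem.Str.replace codeline "return" "")
    else (false, "")
  let scanned := codeline.toList.dropLast        -- codeline[:-1] drops exactly the last character
  let tok : List Char :=
    if PySem.Chars.isIn [';'] scanned then []
    else (scanned.dropWhile (· == ' ')).takeWhile (· != ' ')   -- lstrip(' ') then split(' ')[0]
  let ftS := if tok = "void".toList ∨ tok = "int".toList ∨ tok = "double".toList ∨ tok = "float".toList
             then String.ofList tok else ""
  (fa.1, ftS, fa.2)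

-- ===== PRECONDITION & SPEC =====
def Spec_functionStartEndIndexChecker (codeline : String) (out : Bool × String × String) : Prop := out = functionStartEndIndexChecker_alt codeline
instance (codeline : String) (out : Bool × String × String) : Decidable (Spec_functionStartEndIndexChecker codeline out) := by unfold Spec_functionStartEndIndexChecker; infer_instance

-- ===== CLAIM (what is proved, stated in full; the proofs are below) =====
def Claim_equal_functionStartEndIndexChecker : Prop := ∀ (codeline : String), Dom_functionStartEndIndexChecker codeline → Spec_functionStartEndIndexChecker codeline (functionStartEndIndexChecker codeline)

-- ===== LEMMAS AND PROOFS =====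

-- with changeName already false, the loop only watches for ';' in codeline[:-1]
theorem pvALoop_false (l : List Char) : ∀ ft, pvALoop l ft false = if ';' ∈ l.dropLast then [] else ft := by
  induction l with
  | nil => intro ft; simp [pvALoop]
  | cons c t ih =>
    intro ft
    cases t with
    | nil => simp [pvALoop]
    | cons d r =>
      by_cases hc : c = ';'
      · subst hc; simp [pvALoop]
      · simp [pvALoop, hc, Ne.symm hc, ih]

theorem pvAux_drop (d : Char) (r : List Char) (h : ¬ d = ' ') :
    (List.dropLast (d :: r)).dropWhile (· == ' ') = List.dropLast (d :: r) := by
  cases r <;> simp_all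

theorem pvAux_take (r : List Char) :
    (List.dropLast (' ' :: r)).takeWhile (· != ' ') = [] := by
  cases r <;> simp

-- A's scanning loop computes B's slice/lstrip/split expression
theorem pvALoop_true (l : List Char) : ∀ ft, pvALoop l ft true =
    if ';' ∈ l.dropLast then []
    else ft ++ ((l.dropLast.dropWhile (· == ' ')).takeWhile (· != ' ')) := by
  induction l with
  | nil => intro ft; simp [pvALoop]
  | cons c t ih =>
    intro ft
    cases t with
    | nil => simp [pvALoop]
    | cons d r =>
      by_cases hc : c = ';'
      · subst hc; simp [pvALoop]
      · by_cases hsp : c = ' '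
        · subst hsp; simp [pvALoop, hc, Ne.symm hc, ih]
        · by_cases hd : d = ' '
          · subst hd
            simp [pvALoop, hc, Ne.symm hc, hsp, pvALoop_false, pvAux_take]
          · simp [pvALoop, hc, Ne.symm hc, hsp, hd, ih, pvAux_drop d r hd]

-- ===== VERDICT (by name: the statement is the Claim_ definition above) =====
theorem functionStartEndIndexChecker_spec : Claim_equal_functionStartEndIndexChecker := by
  intro codeline _
  unfold Spec_functionStartEndIndexChecker functionStartEndIndexChecker functionStartEndIndexChecker_alt
  have h : PySem.Chars.isIn [';'] codeline.toList.dropLast = decide (';' ∈ codeline.toList.dropLast) := by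
    by_cases hm : ';' ∈ codeline.toList.dropLast
    · simp [hm, (PySem.Chars.isIn_iff_infix _ _).mpr ((List.singleton_infix_iff _ _).mpr hm)]
    · simp [hm, ← Bool.not_eq_true]
      intro hI; exact hm ((List.singleton_infix_iff _ _).mp ((PySem.Chars.isIn_iff_infix _ _).mp hI))
  by_cases hm : ';' ∈ codeline.toList.dropLast <;> simp [pvALoop_true, h, hm]
  split_ifs <;> tauto
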